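-- pv_equiv track=rewrite | github.com/QE-Lab/QuASeR | QA_DeNovoAsb/denovo_006.py | pwalign
-- ===== SOURCE A (Python) =====
-- def pwalign(read1,read2,mm):
-- 	l1 = len(read1)
-- 	l2 = len(read2)
-- 	for shift in range(l1-l2,l1):
-- 		mmr = 0
-- 		r2i = 0
-- 		for r1i in range(shift,l1):
-- 			if read1[r1i]!=read2[r2i]:
-- 				mmr += 1
-- 			r2i += 1
-- 			if mmr > mm:
-- 				break
-- 		if mmr <= mm:
-- 			return l2-shift
-- 	return 0
-- ===== SOURCE B (Python) =====
-- def pwalign(read1, read2, mm):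
--     l1 = len(read1)
--     l2 = len(read2)
--     base = l1 - l2
--     # index read2: character -> list of positions
--     pos2 = {}
--     for j, c in enumerate(read2):
--         pos2.setdefault(c, []).append(j)
--     # count matching pairs per shift in one pass over the compared read1 cells:
--     # cell q of read1 matches read2 position j exactly for the shift s = q - j
--     matches = {}
--     for q in range(base, l1):
--         for j in pos2.get(read1[q], []):
--             s = q - j
--             if base <= s:
--                 matches[s] = matches.get(s, 0) + 1
--     # first shift whose mismatch count (overlap length minus matches) fits the budget
--     for s in range(base, l1):
--         if (l1 - s) - matches.get(s, 0) <= mm: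
--             return l2 - s
--     return 0
-- ===== Notes on version B (the rewrite author's own statement) =====
-- stated objective: alternative
-- what changed: B replaces A's per-shift rescan of read2 (nested loops with a mismatch counter and break) by a character-position index of read2 plus one pass over read1's compared cells that tallies the matches of every shift into a counter dict at once; the answer is the first shift whose overlap length minus its match count fits the budget, so the per-shift inner comparison scan disappears.
import Mathlib
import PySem

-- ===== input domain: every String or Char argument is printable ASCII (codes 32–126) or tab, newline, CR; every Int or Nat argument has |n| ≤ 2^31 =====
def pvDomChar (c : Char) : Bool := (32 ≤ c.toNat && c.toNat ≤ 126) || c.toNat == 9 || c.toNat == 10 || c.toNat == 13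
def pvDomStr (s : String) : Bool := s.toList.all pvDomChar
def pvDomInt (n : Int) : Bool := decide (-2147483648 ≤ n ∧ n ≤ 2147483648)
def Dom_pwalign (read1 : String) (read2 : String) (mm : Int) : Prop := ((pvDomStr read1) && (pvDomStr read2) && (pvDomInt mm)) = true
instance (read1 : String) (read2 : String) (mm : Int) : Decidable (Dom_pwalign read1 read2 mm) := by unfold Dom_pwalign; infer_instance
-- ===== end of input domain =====

-- B indexes read2's character positions and tallies matches per shift in one pass over read1's
-- compared cells (a counter dict), instead of A's per-shift mismatch rescan; alternative algorithm, same worst-case cost.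


-- ===== PORT A =====
-- inner loop 'for r1i in range(shift, l1): …' with state (mmr, r2i); pyGet? is Python indexing
-- (negative indices count from the end; none = IndexError, which occurs only outside Pre_pwalign)
def pwalignInnerA (r1 r2 : List Char) (mm : Int) : List Int → Int × Int → Int
  | [], s => s.1
  | r1i :: rest, s =>
    let mmr := if PySem.List.pyGet? r1 r1i ≠ PySem.List.pyGet? r2 s.2 then s.1 + 1 else s.1
    let r2i := s.2 + 1
    if mmr > mm then mmr else pwalignInnerA r1 r2 mm rest (mmr, r2i)

-- outer loop 'for shift in range(l1-l2, l1): …' with early return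
def pwalignOuterA (r1 r2 : List Char) (mm l1 l2 : Int) : List Int → Int
  | [] => 0
  | shift :: rest =>
    let mmr := pwalignInnerA r1 r2 mm (PySem.List.pyRange shift l1 1) (0, 0)
    if mmr ≤ mm then l2 - shift else pwalignOuterA r1 r2 mm l1 l2 rest

def pwalign (read1 : String) (read2 : String) (mm : Int) : Int :=
  let r1 := read1.toList
  let r2 := read2.toList
  let l1 : Int := r1.length
  let l2 : Int := r2.length
  pwalignOuterA r1 r2 mm l1 l2 (PySem.List.pyRange (l1 - l2) l1 1)

-- ===== PORT B =====
-- pos2 = {} ; for j, c in enumerate(read2): pos2.setdefault(c, []).append(j)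
def pwalignPos2 (r2 : List Char) : PySem.Dict Char (List Int) :=
  (PySem.List.enumerate r2 0).foldl (fun d p => d.modify p.2 [] (fun x => x ++ [p.1])) PySem.Dict.empty

-- matches = {} ; for q in range(base, l1): for j in pos2.get(read1[q], []):
--   s = q - j ; if base <= s: matches[s] = matches.get(s, 0) + 1
-- (read1[q] is always in range inside Pre_pwalign, so pyGetD's default is never used)
def pwalignMatches (r1 : List Char) (pos2 : PySem.Dict Char (List Int)) (base l1 : Int) : PySem.Dict Int Int :=
  (PySem.List.pyRange base l1 1).foldl (fun m q =>
    (pos2.getD (PySem.List.pyGetD r1 q ' ') []).foldl (fun m j =>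
      if base ≤ q - j then m.insert (q - j) (m.getD (q - j) 0 + 1) else m) m)
    PySem.Dict.empty

-- for s in range(base, l1): if (l1 - s) - matches.get(s, 0) <= mm: return l2 - s ; return 0
def pwalignScan (mm l1 l2 : Int) (mtc : PySem.Dict Int Int) : List Int → Int
  | [] => 0
  | s :: rest => if (l1 - s) - mtc.getD s 0 ≤ mm then l2 - s else pwalignScan mm l1 l2 mtc rest

def pwalign_alt (read1 : String) (read2 : String) (mm : Int) : Int :=
  let r1 := read1.toList
  let r2 := read2.toList
  let l1 : Int := r1.length
  let l2 : Int := r2.length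
  let base := l1 - l2
  pwalignScan mm l1 l2 (pwalignMatches r1 (pwalignPos2 r2) base l1) (PySem.List.pyRange base l1 1)

-- ===== PRECONDITION & SPEC =====
-- Pre_ excludes exactly the inputs where A raises IndexError: when len(read2) > 2*len(read1)
-- A's very first index read1[l1-l2] is below -l1 (B raises on the same inputs).
def Pre_pwalign (read1 : String) (read2 : String) (mm : Int) : Prop :=
  PySem.Str.len read2 ≤ 2 * PySem.Str.len read1
instance (read1 : String) (read2 : String) (mm : Int) : Decidable (Pre_pwalign read1 read2 mm) := by
  unfold Pre_pwalign; infer_instance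
def pvWitness_pwalign : String × String × Int := ("ab", "b", 0)

def Spec_pwalign (read1 : String) (read2 : String) (mm : Int) (out : Int) : Prop := out = pwalign_alt read1 read2 mm
instance (read1 : String) (read2 : String) (mm : Int) (out : Int) : Decidable (Spec_pwalign read1 read2 mm out) := by unfold Spec_pwalign; infer_instance

-- ===== CLAIM (what is proved, stated in full; the proofs are below) =====
def Claim_equal_pwalign : Prop := ∀ (read1 : String) (read2 : String) (mm : Int), Dom_pwalign read1 read2 mm → Pre_pwalign read1 read2 mm → Spec_pwalign read1 read2 mm (pwalign read1 read2 mm)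

-- ===== LEMMAS AND PROOFS =====

-- mismatch / match counts of the window of t compared cells starting at read1 index q, read2 index j
def pwalignCntD (r1 r2 : List Char) : Int → Int → Nat → Int
  | _, _, 0 => 0
  | q, j, t + 1 =>
    (if PySem.List.pyGet? r1 q ≠ PySem.List.pyGet? r2 j then (1 : Int) else 0)
      + pwalignCntD r1 r2 (q + 1) (j + 1) t

def pwalignCntM (r1 r2 : List Char) : Int → Int → Nat → Int
  | _, _, 0 => 0
  | q, j, t + 1 =>
    (if PySem.List.pyGet? r1 q = PySem.List.pyGet? r2 j then (1 : Int) else 0)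
      + pwalignCntM r1 r2 (q + 1) (j + 1) t

-- B-side per-cell key list of the counting loop (proof-side abbreviation of the ported body)
def pwalignKeys (r1 r2 : List Char) (base : Int) (q : Int) : List Int :=
  (((pwalignPos2 r2).getD (PySem.List.pyGetD r1 q ' ') []).filter
    (fun j => decide (base ≤ q - j))).map (fun j => q - j)

theorem pwalignCntD_nonneg (r1 r2 : List Char) :
    ∀ (t : Nat) (q j : Int), 0 ≤ pwalignCntD r1 r2 q j t := by
  intro t
  induction t with
  | zero => intro q j; simp [pwalignCntD]
  | succ t ih =>
    intro q j
    have := ih (q + 1) (j + 1)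
    simp only [pwalignCntD]
    split <;> omega

theorem pwalignCntD_add_cntM (r1 r2 : List Char) :
    ∀ (t : Nat) (q j : Int), pwalignCntD r1 r2 q j t + pwalignCntM r1 r2 q j t = t := by
  intro t
  induction t with
  | zero => intro q j; simp [pwalignCntD, pwalignCntM]
  | succ t ih =>
    intro q j
    have := ih (q + 1) (j + 1)
    simp only [pwalignCntD, pwalignCntM]
    by_cases h : PySem.List.pyGet? r1 q = PySem.List.pyGet? r2 j
    · rw [if_neg (by simp [h]), if_pos h]; push_cast; omega
    · rw [if_pos h, if_neg h]; push_cast; omega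

-- A's inner loop accepts (final mmr ≤ mm, break included) iff the full mismatch count does
theorem pwalignInnerA_le_iff (r1 r2 : List Char) (mm : Int) :
    ∀ (t : Nat) (q j mmr : Int),
      (pwalignInnerA r1 r2 mm (PySem.List.pyRange q (q + t) 1) (mmr, j) ≤ mm
        ↔ mmr + pwalignCntD r1 r2 q j t ≤ mm) := by
  intro t
  induction t with
  | zero =>
    intro q j mmr
    rw [PySem.List.pyRange_one_eq_nil (by push_cast; omega)]
    simp [pwalignInnerA, pwalignCntD]
  | succ t ih =>
    intro q j mmr
    rw [PySem.List.pyRange_one_cons (by push_cast; omega)]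
    have hrw : q + ((t + 1 : Nat) : Int) = (q + 1) + (t : Int) := by push_cast; ring
    rw [hrw]
    simp only [pwalignInnerA, pwalignCntD]
    have hnn := pwalignCntD_nonneg r1 r2 t (q + 1) (j + 1)
    by_cases hc : PySem.List.pyGet? r1 q = PySem.List.pyGet? r2 j
    · have hcne : ¬ (PySem.List.pyGet? r1 q ≠ PySem.List.pyGet? r2 j) := by simp [hc]
      simp only [if_neg hcne]
      by_cases hbr : mmr > mm
      · rw [if_pos hbr]
        constructor <;> intro h <;> omega
      · rw [if_neg hbr, ih (q + 1) (j + 1) mmr]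
        omega
    · simp only [if_pos hc]
      by_cases hbr : mmr + 1 > mm
      · rw [if_pos hbr]
        constructor <;> intro h <;> omega
      · rw [if_neg hbr, ih (q + 1) (j + 1) (mmr + 1)]
        omega

-- the default ' ' of the port's read1[q] is never used in range
theorem pwalign_pyGet?_eq_some (xs : List Char) (i : Int)
    (h1 : -(xs.length : Int) ≤ i) (h2 : i < (xs.length : Int)) :
    PySem.List.pyGet? xs i = some (PySem.List.pyGetD xs i ' ') := by
  obtain ⟨c, hc⟩ : ∃ c, PySem.List.pyGet? xs i = some c := by
    cases h : PySem.List.pyGet? xs i with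
    | none =>
      rw [PySem.List.pyGet?_eq_none_iff] at h
      exact absurd (by constructor <;> omega) h
    | some c => exact ⟨c, rfl⟩
  rw [hc]
  have : PySem.List.pyGetD xs i ' ' = c := by
    simp [PySem.List.pyGetD, hc]
  rw [this]

-- pos2 characterization: the dict of read2's character positions
theorem pwalignPos2_getD (r2 : List Char) (c : Char) :
    (pwalignPos2 r2).getD c [] =
      ((PySem.List.enumerate r2 0).filter (fun p => p.2 == c)).map (fun p => p.1) := by
  unfold pwalignPos2
  have h := PySem.Dict.getD_foldl_modify_append
      ((PySem.List.enumerate r2 0).map (fun p => (p.2, p.1)))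
      (PySem.Dict.empty : PySem.Dict Char (List Int)) c
  rw [List.foldl_map] at h
  simp only at h
  rw [h]
  simp [List.filter_map, List.map_map, Function.comp_def]

theorem mem_pwalignPos2 (r2 : List Char) (c : Char) (j : Int) :
    j ∈ (pwalignPos2 r2).getD c [] ↔
      ∃ (k : Nat) (h : k < r2.length), j = (k : Int) ∧ r2[k] = c := by
  rw [pwalignPos2_getD]
  simp only [List.mem_map, List.mem_filter]
  constructor
  · rintro ⟨p, ⟨hp, hpc⟩, rfl⟩
    rw [PySem.List.mem_enumerate_iff] at hp
    obtain ⟨k, hk, rfl⟩ := hp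
    refine ⟨k, hk, by omega, by simpa using hpc⟩
  · rintro ⟨k, hk, rfl, hkc⟩
    refine ⟨((k : Int), r2[k]), ⟨?_, by simpa using hkc⟩, rfl⟩
    rw [PySem.List.mem_enumerate_iff]
    exact ⟨k, hk, by simp⟩

theorem nodup_pwalignPos2 (r2 : List Char) (c : Char) :
    ((pwalignPos2 r2).getD c []).Nodup := by
  rw [pwalignPos2_getD]
  have h1 : ((PySem.List.enumerate r2 0).filter (fun p => p.2 == c)).Pairwise
      (fun p q : Int × Char => p.1 < q.1) :=
    (PySem.List.pairwise_lt_enumerate r2 0).filter _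
  have h2 : (((PySem.List.enumerate r2 0).filter (fun p => p.2 == c)).map
      (fun p => p.1)).Pairwise (fun a b : Int => a ≠ b) :=
    List.Pairwise.map _ (fun _ _ hab => ne_of_lt hab) h1
  exact h2

-- the ported inner counting loop, rewritten over its per-cell key list
theorem pwalign_inner_keys (base q : Int) :
    ∀ (P : List Int) (m : PySem.Dict Int Int),
      P.foldl (fun m j =>
        if base ≤ q - j then m.insert (q - j) (m.getD (q - j) 0 + 1) else m) m
      = ((P.filter (fun j => decide (base ≤ q - j))).map (fun j => q - j)).foldl
          (fun m k => m.insert k (m.getD k 0 + 1)) m := by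
  intro P
  induction P with
  | nil => intro m; rfl
  | cons j P ih =>
    intro m
    by_cases hj : base ≤ q - j
    · rw [List.foldl_cons, if_pos hj,
        show (j :: P).filter (fun j => decide (base ≤ q - j)) =
          j :: P.filter (fun j => decide (base ≤ q - j)) from by
            rw [List.filter_cons_of_pos (by simpa using hj)],
        List.map_cons, List.foldl_cons, ih]
    · rw [List.foldl_cons, if_neg hj,
        show (j :: P).filter (fun j => decide (base ≤ q - j)) =
          P.filter (fun j => decide (base ≤ q - j)) from by
            rw [List.filter_cons_of_neg (by simpa using hj)],
        ih]

-- the counting loop: matches[s] counts the keys s produced over all compared cells q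
theorem pwalignMatches_getD_gen (r1 r2 : List Char) (base s : Int) :
    ∀ (L : List Int) (m : PySem.Dict Int Int),
      (L.foldl (fun m q =>
        ((pwalignPos2 r2).getD (PySem.List.pyGetD r1 q ' ') []).foldl (fun m j =>
          if base ≤ q - j then m.insert (q - j) (m.getD (q - j) 0 + 1) else m) m) m).getD s 0
      = m.getD s 0 + (((L.map (pwalignKeys r1 r2 base)).flatten).count s : Int) := by
  intro L
  induction L with
  | nil => intro m; simp
  | cons q L ih =>
    intro m
    rw [List.foldl_cons, pwalign_inner_keys, ih]
    rw [show (((pwalignPos2 r2).getD (PySem.List.pyGetD r1 q ' ') []).filter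
          (fun j => decide (base ≤ q - j))).map (fun j => q - j) = pwalignKeys r1 r2 base q
        from rfl]
    rw [PySem.Dict.getD_foldl_insert_add_one]
    rw [List.map_cons, List.flatten_cons, List.count_append]
    push_cast
    ring

theorem pwalignMatches_getD (r1 r2 : List Char) (base l1 s : Int) :
    (pwalignMatches r1 (pwalignPos2 r2) base l1).getD s 0 =
      ((((PySem.List.pyRange base l1 1).map (pwalignKeys r1 r2 base)).flatten).count s : Int) := by
  unfold pwalignMatches
  rw [pwalignMatches_getD_gen]
  have hempty : (PySem.Dict.empty : PySem.Dict Int Int).getD s 0 = 0 := rfl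
  rw [hempty, zero_add]

-- within Pre_, cell q contributes key s exactly when its read2 partner matches (and s ≤ q)
theorem pwalign_cell_count (r1 r2 : List Char) (base s q : Int)
    (hbase : base = (r1.length : Int) - (r2.length : Int))
    (hPre : (r2.length : Int) ≤ 2 * (r1.length : Int))
    (hs : base ≤ s) (hq1 : base ≤ q) (hq2 : q < (r1.length : Int)) :
    (((pwalignKeys r1 r2 base q).count s : Nat) : Int) =
      if s ≤ q ∧ PySem.List.pyGet? r1 q = PySem.List.pyGet? r2 (q - s) then 1 else 0 := by
  unfold pwalignKeys
  have hinj : Function.Injective (fun j : Int => q - j) := by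
    intro a b h
    have h' : q - a = q - b := h
    omega
  have hcnt := List.count_map_of_injective
    (((pwalignPos2 r2).getD (PySem.List.pyGetD r1 q ' ') []).filter
      (fun j => decide (base ≤ q - j))) (fun j : Int => q - j) hinj (q - s)
  have hqq : q - (q - s) = s := by ring
  simp only [hqq] at hcnt
  rw [hcnt]
  have hget1 : PySem.List.pyGet? r1 q = some (PySem.List.pyGetD r1 q ' ') :=
    pwalign_pyGet?_eq_some r1 q (by omega) (by omega)
  have hmem_iff : (q - s) ∈ (((pwalignPos2 r2).getD (PySem.List.pyGetD r1 q ' ') []).filter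
      (fun j => decide (base ≤ q - j)))
      ↔ (s ≤ q ∧ PySem.List.pyGet? r1 q = PySem.List.pyGet? r2 (q - s)) := by
    rw [List.mem_filter]
    constructor
    · rintro ⟨hmem, -⟩
      rw [mem_pwalignPos2] at hmem
      obtain ⟨k, hk, hjk, hkc⟩ := hmem
      have hqs : 0 ≤ q - s := by omega
      refine ⟨by omega, ?_⟩
      rw [hget1, PySem.List.pyGet?_of_nonneg _ hqs]
      have hkk : (q - s).toNat = k := by omega
      rw [hkk, List.getElem?_eq_getElem hk, hkc]
    · rintro ⟨hsq, heq⟩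
      have hqs : 0 ≤ q - s := by omega
      rw [hget1, PySem.List.pyGet?_of_nonneg _ hqs] at heq
      have hsome := heq.symm
      rw [List.getElem?_eq_some_iff] at hsome
      obtain ⟨hlt, hval⟩ := hsome
      refine ⟨?_, by simpa using hs⟩
      rw [mem_pwalignPos2]
      exact ⟨(q - s).toNat, hlt, by omega, hval⟩
  by_cases hmem : (q - s) ∈ (((pwalignPos2 r2).getD (PySem.List.pyGetD r1 q ' ') []).filter
      (fun j => decide (base ≤ q - j)))
  · rw [List.count_eq_one_of_mem ((nodup_pwalignPos2 r2 _).filter _) hmem,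
      if_pos (hmem_iff.1 hmem)]
    simp
  · rw [List.count_eq_zero_of_not_mem hmem, if_neg (fun h => hmem (hmem_iff.2 h))]
    simp

-- summing the match indicators over the window [q, q+t) is the recursive match count
theorem pwalign_sum_cntM (r1 r2 : List Char) (s : Int) :
    ∀ (t : Nat) (q : Int), s ≤ q →
      ((PySem.List.pyRange q (q + t) 1).map (fun u =>
        if s ≤ u ∧ PySem.List.pyGet? r1 u = PySem.List.pyGet? r2 (u - s) then (1 : Int) else 0)).sum
        = pwalignCntM r1 r2 q (q - s) t := by
  intro t
  induction t with
  | zero =>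
    intro q hq
    rw [PySem.List.pyRange_one_eq_nil (by push_cast; omega)]
    simp [pwalignCntM]
  | succ t ih =>
    intro q hq
    rw [PySem.List.pyRange_one_cons (by push_cast; omega)]
    have hrw : q + ((t + 1 : Nat) : Int) = (q + 1) + (t : Int) := by push_cast; ring
    rw [hrw]
    rw [List.map_cons, List.sum_cons, ih (q + 1) (by omega)]
    simp only [pwalignCntM]
    rw [show q + 1 - s = (q - s) + 1 from by ring,
      if_congr (and_iff_right hq) rfl rfl]

-- zero contribution of cells before the shift
theorem pwalign_sum_before (r1 r2 : List Char) (s : Int) (a b : Int) (hb : b ≤ s) :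
    ((PySem.List.pyRange a b 1).map (fun u =>
      if s ≤ u ∧ PySem.List.pyGet? r1 u = PySem.List.pyGet? r2 (u - s) then (1 : Int) else 0)).sum = 0 := by
  apply List.sum_eq_zero
  intro x hx
  rw [List.mem_map] at hx
  obtain ⟨u, hu, rfl⟩ := hx
  rw [PySem.List.mem_pyRange_one] at hu
  rw [if_neg (by rintro ⟨h1, -⟩; omega)]

-- the two outer loops agree element by element once the guards agree
theorem pwalignOuter_eq_scan (r1 r2 : List Char) (mm l1 l2 : Int) (mtc : PySem.Dict Int Int) :
    ∀ L : List Int,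
      (∀ s ∈ L, (pwalignInnerA r1 r2 mm (PySem.List.pyRange s l1 1) (0, 0) ≤ mm
        ↔ (l1 - s) - mtc.getD s 0 ≤ mm)) →
      pwalignOuterA r1 r2 mm l1 l2 L = pwalignScan mm l1 l2 mtc L := by
  intro L
  induction L with
  | nil => intro _; rfl
  | cons s rest ih =>
    intro h
    simp only [pwalignOuterA, pwalignScan]
    rw [if_congr (h s (List.mem_cons_self)) rfl rfl]
    split_ifs with hv
    · rfl
    · exact ih (fun x hx => h x (List.mem_cons_of_mem s hx))

-- ===== VERDICT (by name: the statement is the Claim_ definition above) =====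
theorem pwalign_spec : Claim_equal_pwalign := by
  intro read1 read2 mm _hDom hPre
  unfold Pre_pwalign at hPre
  rw [PySem.Str.len_eq, PySem.Str.len_eq] at hPre
  show pwalign read1 read2 mm = pwalign_alt read1 read2 mm
  simp only [pwalign, pwalign_alt]
  apply pwalignOuter_eq_scan
  intro s hsmem
  rw [PySem.List.mem_pyRange_one] at hsmem
  obtain ⟨hs1, hs2⟩ := hsmem
  have hA := pwalignInnerA_le_iff read1.toList read2.toList mm
      (((read1.toList.length : Int) - s).toNat) s 0 0
  rw [show s + ((((read1.toList.length : Int) - s).toNat : Int)) = (read1.toList.length : Int)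
    from by omega] at hA
  rw [hA]
  rw [pwalignMatches_getD, List.count_flatten, List.map_map]
  have hcast : ((((PySem.List.pyRange ((read1.toList.length : Int) - (read2.toList.length : Int))
        (read1.toList.length : Int) 1).map
        (List.count s ∘ pwalignKeys read1.toList read2.toList
          ((read1.toList.length : Int) - (read2.toList.length : Int)))).sum : Nat) : Int)
      = ((PySem.List.pyRange ((read1.toList.length : Int) - (read2.toList.length : Int))
        (read1.toList.length : Int) 1).map (fun u =>
          if s ≤ u ∧ PySem.List.pyGet? read1.toList u = PySem.List.pyGet? read2.toList (u - s)
          then (1 : Int) else 0)).sum := by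
    rw [Nat.cast_list_sum, List.map_map]
    apply congrArg List.sum
    apply List.map_congr_left
    intro q hq
    rw [PySem.List.mem_pyRange_one] at hq
    exact pwalign_cell_count read1.toList read2.toList _ s q rfl hPre hs1 hq.1 hq.2
  rw [hcast]
  rw [PySem.List.pyRange_one_append ((read1.toList.length : Int) - (read2.toList.length : Int)) s
    (read1.toList.length : Int) hs1 (by omega), List.map_append, List.sum_append,
    pwalign_sum_before read1.toList read2.toList s _ s le_rfl, zero_add]
  have hsum := pwalign_sum_cntM read1.toList read2.toList s
      (((read1.toList.length : Int) - s).toNat) s le_rfl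
  rw [show s + ((((read1.toList.length : Int) - s).toNat : Int)) = (read1.toList.length : Int)
    from by omega, show s - s = (0 : Int) from by ring] at hsum
  rw [hsum]
  have hadd := pwalignCntD_add_cntM read1.toList read2.toList
      (((read1.toList.length : Int) - s).toNat) s 0
  have ht : ((((read1.toList.length : Int) - s).toNat : Int)) = (read1.toList.length : Int) - s := by
    omega
  constructor <;> intro h <;> omega
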